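-- pv_equiv track=rewrite | github.com/JoshuaNgerng/VRP_DEAP | ref2.py | getDayIndexesInSchedule
-- ===== SOURCE A (Python) =====
-- def getDayIndexesInSchedule(
-- 		day: int, schedule: list[int]
-- 	) -> tuple[int, int]:
-- 	day_count = 1; start = 0; end = len(schedule)
-- 	for idx, id in enumerate(schedule):
-- 		if id != 0:
-- 			continue
-- 		day_count += 1
-- 		if day_count == day:
-- 			start = idx + 1
-- 		if day_count == day + 1:
-- 			end = idx
-- 			break
-- 	return (start, end)
-- ===== SOURCE B (Python) =====
-- def getDayIndexesInSchedule(
-- 		day: int, schedule: list[int]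
-- 	) -> tuple[int, int]:
-- 	zeros = [i for i, x in enumerate(schedule) if x == 0]
-- 	start = 0
-- 	end = len(schedule)
-- 	if 2 <= day <= len(zeros) + 1:
-- 		start = zeros[day - 2] + 1
-- 	if 1 <= day <= len(zeros):
-- 		end = zeros[day - 1]
-- 	return (start, end)
-- ===== Notes on version B (the rewrite author's own statement) =====
-- stated objective: alternative
-- what changed: Replaced the accumulating scan with early break by building the index table of zero positions once and computing start/end by direct guarded lookup into it.
import Mathlib
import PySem

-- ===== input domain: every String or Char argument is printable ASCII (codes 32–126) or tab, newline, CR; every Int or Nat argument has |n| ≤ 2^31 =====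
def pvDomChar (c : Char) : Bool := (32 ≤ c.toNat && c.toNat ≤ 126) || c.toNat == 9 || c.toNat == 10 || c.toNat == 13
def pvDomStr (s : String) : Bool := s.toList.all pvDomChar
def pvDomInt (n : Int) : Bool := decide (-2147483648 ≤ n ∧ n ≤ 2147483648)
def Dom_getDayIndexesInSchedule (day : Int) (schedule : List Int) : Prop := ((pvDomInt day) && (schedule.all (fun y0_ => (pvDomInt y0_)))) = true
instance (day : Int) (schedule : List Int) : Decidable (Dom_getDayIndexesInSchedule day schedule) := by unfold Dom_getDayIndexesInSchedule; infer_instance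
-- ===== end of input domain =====

-- Alternative decomposition: build the zero-index table once, then guarded direct lookup.
-- ===== PORT A =====
-- loop of A: state (day_count, start, end), running index idx, early break on day_count == day+1
def pvGoA (day : Int) (idx dc start endv : Int) : List Int → Int × Int
  | [] => (start, endv)
  | x :: xs =>
    if x ≠ 0 then pvGoA day (idx + 1) dc start endv xs
    else
      let dc' := dc + 1
      let start' := if dc' = day then idx + 1 else start
      if dc' = day + 1 then (start', idx)
      else pvGoA day (idx + 1) dc' start' endv xs

def getDayIndexesInSchedule (day : Int) (schedule : List Int) : Int × Int :=
  pvGoA day 0 1 0 (schedule.length : Int) schedule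

-- ===== PORT B =====
-- zeros = [i for i, x in enumerate(schedule) if x == 0]
def pvZerosFrom (idx : Int) : List Int → List Int
  | [] => []
  | x :: xs => if x = 0 then idx :: pvZerosFrom (idx + 1) xs else pvZerosFrom (idx + 1) xs

def getDayIndexesInSchedule_alt (day : Int) (schedule : List Int) : Int × Int :=
  let zeros := pvZerosFrom 0 schedule
  let start := if 2 ≤ day ∧ day ≤ (zeros.length : Int) + 1 then zeros.getD (day - 2).toNat 0 + 1 else 0
  let endv := if 1 ≤ day ∧ day ≤ (zeros.length : Int) then zeros.getD (day - 1).toNat 0 else (schedule.length : Int)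
  (start, endv)

-- ===== PRECONDITION & SPEC =====
def Spec_getDayIndexesInSchedule (day : Int) (schedule : List Int) (out : Int × Int) : Prop := out = getDayIndexesInSchedule_alt day schedule
instance (day : Int) (schedule : List Int) (out : Int × Int) : Decidable (Spec_getDayIndexesInSchedule day schedule out) := by unfold Spec_getDayIndexesInSchedule; infer_instance

-- ===== CLAIM (what is proved, stated in full; the proofs are below) =====
def Claim_equal_getDayIndexesInSchedule : Prop := ∀ (day : Int) (schedule : List Int), Dom_getDayIndexesInSchedule day schedule → Spec_getDayIndexesInSchedule day schedule (getDayIndexesInSchedule day schedule)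

-- ===== LEMMAS AND PROOFS =====

lemma pvGoA_eq (day : Int) : ∀ (xs : List Int) (idx dc start endv : Int),
    pvGoA day idx dc start endv xs =
      ((if 1 ≤ day - dc ∧ day - dc ≤ ((pvZerosFrom idx xs).length : Int)
          then (pvZerosFrom idx xs).getD (day - dc - 1).toNat 0 + 1 else start),
       (if 1 ≤ day + 1 - dc ∧ day + 1 - dc ≤ ((pvZerosFrom idx xs).length : Int)
          then (pvZerosFrom idx xs).getD (day - dc).toNat 0 else endv)) := by
  intro xs
  induction xs with
  | nil =>
    intro idx dc start endv
    simp only [pvGoA, pvZerosFrom, List.length_nil, Nat.cast_zero, Prod.mk.injEq]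
    constructor
    · rw [if_neg (by omega)]
    · rw [if_neg (by omega)]
  | cons x xs ih =>
    intro idx dc start endv
    by_cases hx : x = 0
    · subst hx
      rw [show pvGoA day idx dc start endv ((0 : Int) :: xs) =
            (if dc + 1 = day + 1 then ((if dc + 1 = day then idx + 1 else start), idx)
             else pvGoA day (idx + 1) (dc + 1) (if dc + 1 = day then idx + 1 else start) endv xs)
          from by simp [pvGoA]]
      rw [show pvZerosFrom idx ((0 : Int) :: xs) = idx :: pvZerosFrom (idx + 1) xs
          from by simp [pvZerosFrom]]
      by_cases hb : dc + 1 = day + 1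
      · rw [if_pos hb, if_neg (by omega)]
        simp only [Prod.mk.injEq, List.length_cons]
        constructor
        · rw [if_neg (by push_cast; omega)]
        · rw [if_pos (by push_cast; omega)]
          have h0 : (day - dc).toNat = 0 := by omega
          rw [h0, List.getD_cons_zero]
      · rw [if_neg hb, ih]
        simp only [Prod.mk.injEq, List.length_cons]
        constructor
        · by_cases h1 : day - dc = 1
          · rw [if_neg (by omega), if_pos (by omega), if_pos (by omega)]
            have h0 : (day - dc - 1).toNat = 0 := by omega
            rw [h0, List.getD_cons_zero]
          · by_cases h2 : 2 ≤ day - dc ∧ day - dc ≤ ((pvZerosFrom (idx + 1) xs).length : Int) + 1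
            · rw [if_pos (by omega), if_pos (by push_cast; omega)]
              have hn : (day - dc - 1).toNat = (day - (dc + 1) - 1).toNat + 1 := by omega
              rw [hn, List.getD_cons_succ]
            · rw [if_neg (by omega), if_neg (by omega), if_neg (by omega)]
        · by_cases h2 : 1 ≤ day + 1 - (dc + 1) ∧
              day + 1 - (dc + 1) ≤ ((pvZerosFrom (idx + 1) xs).length : Int)
          · rw [if_pos h2, if_pos (by push_cast; omega)]
            have hn : (day - dc).toNat = (day - (dc + 1)).toNat + 1 := by omega
            rw [hn, List.getD_cons_succ]
          · rw [if_neg h2, if_neg (by push_cast; omega)]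
    · have hz : pvZerosFrom idx (x :: xs) = pvZerosFrom (idx + 1) xs := by
        simp [pvZerosFrom, hx]
      rw [show pvGoA day idx dc start endv (x :: xs) =
            pvGoA day (idx + 1) dc start endv xs from by simp [pvGoA, hx], hz]
      exact ih (idx + 1) dc start endv

-- ===== VERDICT (by name: the statement is the Claim_ definition above) =====
theorem getDayIndexesInSchedule_spec : Claim_equal_getDayIndexesInSchedule := by
  intro day schedule _
  unfold Spec_getDayIndexesInSchedule getDayIndexesInSchedule getDayIndexesInSchedule_alt
  rw [pvGoA_eq]
  dsimp only
  simp only [Prod.mk.injEq]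
  constructor
  · by_cases h : 2 ≤ day ∧ day ≤ ((pvZerosFrom 0 schedule).length : Int) + 1
    · rw [if_pos (by omega), if_pos h]
      have : (day - 1 - 1).toNat = (day - 2).toNat := by omega
      rw [this]
    · rw [if_neg (by omega), if_neg h]
  · by_cases h : 1 ≤ day ∧ day ≤ ((pvZerosFrom 0 schedule).length : Int)
    · rw [if_pos (by omega), if_pos h]
    · rw [if_neg (by omega), if_neg h]
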